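-- pv_equiv track=rewrite | github.com/qiuyang0531-design/my_report_generator | data_reader.py | _apply_ffill
-- ===== SOURCE A (Python) =====
-- def _apply_ffill(data_items, field_names):
--     """
--     对指定字段应用前向填充(ffill)逻辑，处理合并单元格
--
--     Args:
--         data_items: 数据项列表
--         field_names: 需要应用ffill的字段名列表
--
--     Returns:
--         处理后的数据项列表
--     """
--     if not data_items:
--         return data_items
--
--     result = []
--     last_values = {field: None for field in field_names}
--
--     for item in data_items:
--         new_item = item.copy()
--
--         for field in field_names:
--             value = item.get(field)
--
--             if value and str(value).strip():  # 有值
--                 last_values[field] = value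
--                 new_item[field] = value
--             elif last_values[field]:  # 空值，使用前一个值
--                 new_item[field] = last_values[field]
--
--         result.append(new_item)
--
--     return result
-- ===== SOURCE B (Python) =====
-- def _apply_ffill(data_items, field_names):
--     """Index-based ffill: build a per-field table of (row, value) 'events' for the
--     cells holding a real value, then patch each row via a binary search for the
--     latest event at or before it; no fill state is carried across rows."""
--     if not data_items:
--         return data_items
--
--     events = {}
--     for field in field_names:
--         evs = []
--         for i, item in enumerate(data_items):
--             value = item.get(field)
--             if value and str(value).strip():
--                 evs.append((i, value))
--         events[field] = evs
--
--     result = []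
--     for i, item in enumerate(data_items):
--         new_item = item.copy()
--         for field in field_names:
--             evs = events[field]
--             j = _last_event_at_or_before(evs, i)
--             if j >= 0:
--                 new_item[field] = evs[j][1]
--         result.append(new_item)
--     return result
--
--
-- def _last_event_at_or_before(evs, i):
--     """Index of the last event with row index <= i, or -1 (binary search)."""
--     lo, hi = 0, len(evs)
--     while lo < hi:
--         mid = (lo + hi) // 2
--         if evs[mid][0] <= i:
--             lo = mid + 1
--         else:
--             hi = mid
--     return lo - 1
-- ===== Notes on version B (the rewrite author's own statement) =====
-- stated objective: alternative
-- what changed: The single scan carrying a last_values dict is replaced by a two-phase index: per field a precomputed table of (row, value) events at the cells holding a real value, then each row is patched via a binary search for the latest event at or before it, so no fill state is carried across rows (trades the carried state for an O(log n) lookup per cell).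
import Mathlib
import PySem

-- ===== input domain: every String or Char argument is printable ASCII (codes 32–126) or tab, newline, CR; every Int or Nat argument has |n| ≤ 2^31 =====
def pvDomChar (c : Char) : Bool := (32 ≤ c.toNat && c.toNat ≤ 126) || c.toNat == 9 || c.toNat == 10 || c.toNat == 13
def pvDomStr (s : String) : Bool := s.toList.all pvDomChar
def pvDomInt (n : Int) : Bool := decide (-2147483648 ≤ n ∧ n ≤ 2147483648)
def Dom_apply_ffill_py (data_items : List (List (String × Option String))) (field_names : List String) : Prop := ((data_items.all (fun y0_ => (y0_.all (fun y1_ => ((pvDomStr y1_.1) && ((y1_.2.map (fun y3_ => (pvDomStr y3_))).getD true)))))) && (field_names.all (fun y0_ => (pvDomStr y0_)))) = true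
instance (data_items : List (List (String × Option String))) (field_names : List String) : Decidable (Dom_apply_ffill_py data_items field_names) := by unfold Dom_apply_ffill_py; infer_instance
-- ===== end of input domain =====

-- B replaces A's scan with a carried last_values dict by a two-phase index: a precomputed per-field
-- table of (row, value) events plus a binary search per cell for the latest event at or before the
-- row (objective: alternative; no fill state is carried across rows).

-- ===== PORT A =====
-- truthiness of 'value' (a dict value: None or a string)
def pvTruthy (v : Option String) : Bool :=
  match v with
  | none => false
  | some s => s != ""

-- Python's 'value and str(value).strip()' as a Bool (for a string value, str(value) is the value itself)
def pvHasValue (v : Option String) : Bool :=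
  match v with
  | none => false
  | some s => (s != "") && (PySem.Str.strip s != "")

-- the body of A's inner 'for field in field_names' loop: state = (new_item, last_values), reads from src (= item)
def pvStepF (src : PySem.Dict String (Option String))
    (st : PySem.Dict String (Option String) × PySem.Dict String (Option String)) (field : String) :
    PySem.Dict String (Option String) × PySem.Dict String (Option String) :=
  let value := src.getD field none
  if pvHasValue value then
    (st.1.insert field value, st.2.insert field value)
  else if pvTruthy (st.2.getD field none) then
    (st.1.insert field (st.2.getD field none), st.2)
  else
    st

def apply_ffill_py (data_items : List (List (String × Option String))) (field_names : List String) : List (List (String × Option String)) :=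
  if data_items.isEmpty then data_items
  else
    -- last_values = {field: None for field in field_names}
    let last_values : PySem.Dict String (Option String) :=
      field_names.foldl (fun d f => d.insert f none) PySem.Dict.empty
    -- for item in data_items: new_item = item.copy(); for field in field_names: …; result.append(new_item)
    let fin := data_items.foldl
      (fun (st : List (List (String × Option String)) × PySem.Dict String (Option String)) item =>
        let inner := field_names.foldl (pvStepF (PySem.Dict.mk item)) (PySem.Dict.mk item, st.2)
        (st.1 ++ [inner.1.items], inner.2))
      ([], last_values)
    fin.1

-- ===== PORT B =====
-- helper _last_event_at_or_before: 'lo, hi = 0, len(evs); while lo < hi: …' (the while loop as recursion on hi - lo)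
def pvLastLeLoop (evs : List (Int × Option String)) (i : Int) (lo hi : Int) : Int :=
  if _h : lo < hi then
    let mid := PySem.Int.floordiv (lo + hi) 2
    -- evs[mid][0]: in Python always in range here; total form pyGetD under that invariant
    if (PySem.List.pyGetD evs mid (0, none)).1 ≤ i then pvLastLeLoop evs i (mid + 1) hi
    else pvLastLeLoop evs i lo mid
  else lo
termination_by (hi - lo).toNat
decreasing_by
  · have h1 := (PySem.Int.le_floordiv_iff_mul_le (a := lo + hi) (b := 2) (q := lo) (by omega)).mpr (by omega)
    omega
  · have h2 := (PySem.Int.floordiv_lt_iff_lt_mul (a := lo + hi) (b := 2) (q := hi) (by omega)).mpr (by omega)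
    omega

def pvLastLe (evs : List (Int × Option String)) (i : Int) : Int :=
  pvLastLeLoop evs i 0 (PySem.List.len evs) - 1

-- B's per-field event table: 'evs = []; for i, item in enumerate(data_items): … evs.append((i, value))'
def pvEventsCalc (data_items : List (List (String × Option String))) (field : String) : List (Int × Option String) :=
  (PySem.List.enumerate data_items 0).foldl
    (fun evs p =>
      let value := (PySem.Dict.mk p.2).getD field none
      if pvHasValue value then evs ++ [(p.1, value)] else evs)
    []

def apply_ffill_py_alt (data_items : List (List (String × Option String))) (field_names : List String) : List (List (String × Option String)) :=
  if data_items.isEmpty then data_items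
  else
    -- events = {}; for field in field_names: events[field] = evs
    let events : PySem.Dict String (List (Int × Option String)) :=
      field_names.foldl (fun d field => d.insert field (pvEventsCalc data_items field)) PySem.Dict.empty
    -- for i, item in enumerate(data_items): new_item = item.copy(); for field in field_names: …
    (PySem.List.enumerate data_items 0).foldl
      (fun res p =>
        let new_item := field_names.foldl
          (fun d field =>
            let evs := events.getD field []
            let j := pvLastLe evs p.1
            if 0 ≤ j then d.insert field (PySem.List.pyGetD evs j (0, none)).2 else d)
          (PySem.Dict.mk p.2)
        res ++ [new_item.items])
      []

-- ===== PRECONDITION & SPEC =====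
def Spec_apply_ffill_py (data_items : List (List (String × Option String))) (field_names : List String) (out : List (List (String × Option String))) : Prop := out = apply_ffill_py_alt data_items field_names
instance (data_items : List (List (String × Option String))) (field_names : List String) (out : List (List (String × Option String))) : Decidable (Spec_apply_ffill_py data_items field_names out) := by unfold Spec_apply_ffill_py; infer_instance

-- ===== CLAIM (what is proved, stated in full; the proofs are below) =====
def Claim_equal_apply_ffill_py : Prop := ∀ (data_items : List (List (String × Option String))) (field_names : List String), Dom_apply_ffill_py data_items field_names → Spec_apply_ffill_py data_items field_names (apply_ffill_py data_items field_names)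

-- ===== LEMMAS AND PROOFS =====

-- the cell of row at field g, as both programs read it
def pvGetF (row : List (String × Option String)) (g : String) : Option String :=
  (PySem.Dict.mk row).getD g none

-- the forward-fill value of field g after the rows 'p' (none = no real value seen)
def pvFillN (g : String) (p : List (List (String × Option String))) : Option String :=
  p.foldl (fun acc r => if pvHasValue (pvGetF r g) then pvGetF r g else acc) none

-- structural form of B's event table for field g, rows numbered from s
def pvEv (g : String) (s : Int) : List (List (String × Option String)) → List (Int × Option String)
  | [] => []
  | r :: rest => (if pvHasValue (pvGetF r g) then [(s, pvGetF r g)] else []) ++ pvEv g (s + 1) rest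

theorem pv_eventsCalc_eq (g : String) :
    ∀ (rows : List (List (String × Option String))) (s : Int) (acc : List (Int × Option String)),
    (PySem.List.enumerate rows s).foldl
      (fun evs p =>
        let value := (PySem.Dict.mk p.2).getD g none
        if pvHasValue value then evs ++ [(p.1, value)] else evs) acc
      = acc ++ pvEv g s rows := by
  intro rows
  induction rows with
  | nil => intro s acc; simp [PySem.List.enumerate_nil, pvEv]
  | cons r rest ih =>
    intro s acc
    rw [PySem.List.enumerate_cons, List.foldl_cons, ih]
    simp only [pvEv, pvGetF]
    by_cases h : pvHasValue ((PySem.Dict.mk r).getD g none) = true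
    · simp [h]
    · simp [h]

theorem pv_ev_append (g : String) :
    ∀ (xs ys : List (List (String × Option String))) (s : Int),
    pvEv g s (xs ++ ys) = pvEv g s xs ++ pvEv g (s + xs.length) ys := by
  intro xs
  induction xs with
  | nil => intro ys s; simp [pvEv]
  | cons x xs ih =>
    intro ys s
    simp only [List.cons_append, pvEv, ih, List.length_cons]
    rw [List.append_assoc]
    congr 2
    push_cast
    ring_nf

theorem pv_ev_bounds (g : String) :
    ∀ (rows : List (List (String × Option String))) (s : Int) (p : Int × Option String),
    p ∈ pvEv g s rows → s ≤ p.1 ∧ p.1 < s + rows.length := by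
  intro rows
  induction rows with
  | nil => intro s p hp; simp [pvEv] at hp
  | cons r rest ih =>
    intro s p hp
    simp only [pvEv, List.mem_append] at hp
    rcases hp with hp | hp
    · rcases Bool.eq_false_or_eq_true (pvHasValue (pvGetF r g)) with h | h <;> simp [h] at hp
      subst hp
      refine ⟨le_refl _, by simp⟩
    · have := ih (s + 1) p hp
      refine ⟨by omega, by simp [List.length_cons]; omega⟩

theorem pv_ev_valid (g : String) :
    ∀ (rows : List (List (String × Option String))) (s : Int) (p : Int × Option String),
    p ∈ pvEv g s rows → pvHasValue p.2 = true := by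
  intro rows
  induction rows with
  | nil => intro s p hp; simp [pvEv] at hp
  | cons r rest ih =>
    intro s p hp
    simp only [pvEv, List.mem_append] at hp
    rcases hp with hp | hp
    · rcases Bool.eq_false_or_eq_true (pvHasValue (pvGetF r g)) with h | h <;> simp [h] at hp
      subst hp
      simpa using h
    · exact ih (s + 1) p hp

-- the fill value is the value of the last event
theorem pv_fill_ev (g : String) :
    ∀ (rows : List (List (String × Option String))) (s : Int) (acc : Option String),
    rows.foldl (fun acc r => if pvHasValue (pvGetF r g) then pvGetF r g else acc) acc
      = match (pvEv g s rows).getLast? with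
        | some p => p.2
        | none => acc := by
  intro rows
  induction rows with
  | nil => intro s acc; simp [pvEv]
  | cons r rest ih =>
    intro s acc
    rw [List.foldl_cons, ih (s := s + 1)]
    simp only [pvEv]
    by_cases h : pvHasValue (pvGetF r g) = true
    · simp only [h, if_true]
      rcases he : (pvEv g (s + 1) rest).getLast? with _ | p
      · have hnil : pvEv g (s + 1) rest = [] := List.getLast?_eq_none_iff.mp he
        simp [hnil]
      · have hne : pvEv g (s + 1) rest ≠ [] := by
          intro hc; rw [hc] at he; simp at he
        rw [List.getLast?_append_of_ne_nil _ hne, he]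
    · simp [h]

-- a some fill value is a valid (hence truthy) cell value
theorem pv_fill_truthy (g : String) (rows : List (List (String × Option String))) :
    pvTruthy (pvFillN g rows) = (pvFillN g rows).isSome := by
  rw [pvFillN, pv_fill_ev g rows 0 none]
  rcases he : (pvEv g 0 rows).getLast? with _ | p
  · simp [pvTruthy]
  · have hmem : p ∈ pvEv g 0 rows := List.mem_of_getLast? he
    have hv := pv_ev_valid g rows 0 p hmem
    rcases p with ⟨k, _ | s⟩
    · simp [pvHasValue] at hv
    · simp only [pvHasValue, Bool.and_eq_true, bne_iff_ne] at hv
      simp [pvTruthy, hv.1]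

-- binary-search loop correctness on a partitioned list
theorem pv_loop_correct (i : Int) (P S : List (Int × Option String))
    (hP : ∀ p ∈ P, p.1 ≤ i) (hS : ∀ p ∈ S, i < p.1) :
    ∀ (n : Nat) (lo hi : Int), (hi - lo).toNat ≤ n →
    0 ≤ lo → lo ≤ P.length → (P.length : Int) ≤ hi → hi ≤ (P ++ S).length →
    pvLastLeLoop (P ++ S) i lo hi = P.length := by
  intro n
  induction n with
  | zero =>
    intro lo hi hfuel h0 h1 h2 h3
    have : ¬ lo < hi := by omega
    rw [pvLastLeLoop, dif_neg this]
    omega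
  | succ n ih =>
    intro lo hi hfuel h0 h1 h2 h3
    by_cases hlt : lo < hi
    · rw [pvLastLeLoop, dif_pos hlt]
      have hmlo : lo ≤ PySem.Int.floordiv (lo + hi) 2 :=
        (PySem.Int.le_floordiv_iff_mul_le (by omega)).mpr (by omega)
      have hmhi : PySem.Int.floordiv (lo + hi) 2 < hi :=
        (PySem.Int.floordiv_lt_iff_lt_mul (by omega)).mpr (by omega)
      set mid := PySem.Int.floordiv (lo + hi) 2 with hmid
      have hrange : 0 ≤ mid ∧ mid < ((P ++ S).length : Int) := by
        constructor <;> omega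
      have hget : PySem.List.pyGetD (P ++ S) mid (0, none) = (P ++ S)[mid.toNat] := by
        exact PySem.List.pyGetD_eq_getElem _ _ hrange.1 hrange.2
      by_cases hin : mid.toNat < P.length
      · have helem : (P ++ S)[mid.toNat]'(by simp; omega) = P[mid.toNat] := by
          rw [List.getElem_append_left hin]
        have hle : (PySem.List.pyGetD (P ++ S) mid (0, none)).1 ≤ i := by
          rw [hget, helem]; exact hP _ (List.getElem_mem hin)
        simp only [hle, if_pos]
        exact ih (mid + 1) hi (by omega) (by omega) (by omega) (by omega) (by omega)
      · have hm2 : mid.toNat - P.length < S.length := by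
          have : mid.toNat < (P ++ S).length := by omega
          simp at this; omega
        have helem : (P ++ S)[mid.toNat]'(by simp; omega) = S[mid.toNat - P.length] := by
          rw [List.getElem_append_right (by omega)]
        have hgt : ¬ (PySem.List.pyGetD (P ++ S) mid (0, none)).1 ≤ i := by
          rw [hget, helem]
          have := hS _ (List.getElem_mem hm2)
          omega
        simp only [hgt, if_false]
        exact ih lo mid (by omega) (by omega) (by omega) (by omega) (by omega)
    · rw [pvLastLeLoop, dif_neg hlt]
      omega

-- characterisation of B's per-field patch: insert the fill value of the prefix up to this row, if any
theorem pv_bstep_char (g : String) (pre rest : List (List (String × Option String)))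
    (r : List (String × Option String)) (d : PySem.Dict String (Option String)) :
    (let evs := pvEv g 0 (pre ++ r :: rest)
     let j := pvLastLe evs (pre.length : Int)
     if 0 ≤ j then d.insert g (PySem.List.pyGetD evs j (0, none)).2 else d)
    = (if (pvFillN g (pre ++ [r])).isSome then d.insert g (pvFillN g (pre ++ [r])) else d) := by
  have hsplit : pre ++ r :: rest = (pre ++ [r]) ++ rest := by simp
  set P := pvEv g 0 (pre ++ [r]) with hPdef
  set S := pvEv g (0 + (pre ++ [r]).length) rest with hSdef
  have hev : pvEv g 0 (pre ++ r :: rest) = P ++ S := by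
    rw [hsplit, pv_ev_append]
  have hP : ∀ p ∈ P, p.1 ≤ (pre.length : Int) := by
    intro p hp
    have := pv_ev_bounds g (pre ++ [r]) 0 p hp
    simp at this
    omega
  have hS : ∀ p ∈ S, (pre.length : Int) < p.1 := by
    intro p hp
    have := pv_ev_bounds g rest (0 + (pre ++ [r]).length) p hp
    simp at this
    omega
  have hloop : pvLastLeLoop (P ++ S) (pre.length : Int) 0 (PySem.List.len (P ++ S)) = P.length := by
    apply pv_loop_correct (pre.length : Int) P S hP hS (PySem.List.len (P ++ S) - 0).toNat
      0 (PySem.List.len (P ++ S)) (le_refl _) (le_refl _)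
    · simp
    · simp [PySem.List.len_eq]
    · simp [PySem.List.len_eq]
  have hfill : pvFillN g (pre ++ [r]) = match P.getLast? with
      | some p => p.2
      | none => (none : Option String) := by
    rw [pvFillN, pv_fill_ev g (pre ++ [r]) 0 none, hPdef]
  simp only [hev, pvLastLe, hloop]
  rcases hPe : P with _ | ⟨p0, Ptl⟩
  · -- no event at or before this row: j = -1, fill is none
    have : pvFillN g (pre ++ [r]) = none := by rw [hfill, hPe]; simp
    simp [this]
  · -- j = P.length - 1 ≥ 0 points at the last element of P
    rw [← hPe]
    have hPne : P ≠ [] := by rw [hPe]; exact List.cons_ne_nil _ _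
    have hlen : 1 ≤ P.length := by rw [hPe]; exact Nat.succ_le_succ (Nat.zero_le _)
    have hj : (0:Int) ≤ (P.length : Int) - 1 := by omega
    obtain ⟨q, hq⟩ : ∃ q, P.getLast? = some q := by
      cases hqq : P.getLast? with
      | none => exact absurd (List.getLast?_eq_none_iff.mp hqq) hPne
      | some q => exact ⟨q, rfl⟩
    have hfs : pvFillN g (pre ++ [r]) = q.2 := by rw [hfill, hq]
    have hvalid := pv_ev_valid g (pre ++ [r]) 0 q (List.mem_of_getLast? (hPdef ▸ hq))
    have hsome : (q.2).isSome := by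
      rcases q with ⟨k, _ | s⟩
      · simp [pvHasValue] at hvalid
      · simp
    have hget : PySem.List.pyGetD (P ++ S) ((P.length : Int) - 1) (0, none) = q := by
      have h1 : PySem.List.pyGetD (P ++ S) ((P.length : Int) - 1) (0, none)
          = (P ++ S)[((P.length : Int) - 1).toNat]'(by simp; omega) :=
        PySem.List.pyGetD_eq_getElem _ _ (by omega) (by simp)
      have h2 : ((P.length : Int) - 1).toNat = P.length - 1 := by omega
      have h3 : (P ++ S)[((P.length : Int) - 1).toNat]'(by simp; omega) = P[P.length - 1]'(by omega) := by
        simp only [h2]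
        exact List.getElem_append_left (by omega)
      have h4 : P.getLast? = P[P.length - 1]? := List.getLast?_eq_getElem?
      rw [hq, List.getElem?_eq_getElem (by omega)] at h4
      rw [h1, h3, ← Option.some.inj h4]
    rw [if_pos hj, hget, hfs]
    simp [hsome]

-- characterisation of A's per-field step, given that last_values holds the fill value of the prefix
theorem pv_astep_char (g : String) (pre : List (List (String × Option String)))
    (r : List (String × Option String)) (d lv : PySem.Dict String (Option String))
    (hlv : pvHasValue (pvGetF r g) = false → lv.getD g none = pvFillN g pre) :
    pvStepF (PySem.Dict.mk r) (d, lv) g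
      = ((if (pvFillN g (pre ++ [r])).isSome then d.insert g (pvFillN g (pre ++ [r])) else d),
         (if pvHasValue (pvGetF r g) then lv.insert g (pvGetF r g) else lv)) := by
  have hsnoc : pvFillN g (pre ++ [r])
      = if pvHasValue (pvGetF r g) then pvGetF r g else pvFillN g pre := by
    rw [pvFillN, List.foldl_append]
    rfl
  by_cases hv : pvHasValue (pvGetF r g) = true
  · have hsome : (pvGetF r g).isSome := by
      rcases hx : pvGetF r g with _ | s
      · rw [hx] at hv; simp [pvHasValue] at hv
      · simp
    simp [pvStepF, pvGetF] at *
    simp [hv, hsnoc, hsome]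
  · have hlv' := hlv (by simpa using hv)
    have hF : pvFillN g (pre ++ [r]) = pvFillN g pre := by simp [hsnoc, hv]
    have htr := pv_fill_truthy g pre
    simp only [pvStepF]
    rw [show (PySem.Dict.mk r).getD g none = pvGetF r g from rfl]
    simp only [hv, Bool.false_eq_true, if_false, hlv', hF, htr]
    by_cases hs : (pvFillN g pre).isSome
    · simp [hs]
    · simp [hs]

-- the inner field loop: A's (new_item, last_values) fold equals B's new_item fold, and
-- last_values ends holding the fill values through this row for the processed fields
theorem pv_inner (pre rest : List (List (String × Option String)))
    (r : List (String × Option String)) (dd : List (List (String × Option String)))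
    (hdd : dd = pre ++ r :: rest)
    (E : PySem.Dict String (List (Int × Option String))) :
    ∀ (fs : List String) (d lv : PySem.Dict String (Option String)),
    (∀ g ∈ fs, E.getD g [] = pvEv g 0 dd) →
    (∀ g ∈ fs, pvHasValue (pvGetF r g) = false → lv.getD g none = pvFillN g pre) →
    (fs.foldl (pvStepF (PySem.Dict.mk r)) (d, lv)).1
      = fs.foldl
          (fun d field =>
            let evs := E.getD field []
            let j := pvLastLe evs (pre.length : Int)
            if 0 ≤ j then d.insert field (PySem.List.pyGetD evs j (0, none)).2 else d) d
    ∧ ∀ g, (fs.foldl (pvStepF (PySem.Dict.mk r)) (d, lv)).2.getD g none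
        = if g ∈ fs then pvFillN g (pre ++ [r]) else lv.getD g none := by
  intro fs
  induction fs with
  | nil =>
    intro d lv _ _
    refine ⟨rfl, fun g => by simp⟩
  | cons f fs' ih =>
    intro d lv hE hinv
    have hEf' : E.getD f [] = pvEv f 0 (pre ++ r :: rest) := by
      rw [hE f List.mem_cons_self, hdd]
    have hstep := pv_astep_char f pre r d lv (hinv f List.mem_cons_self)
    have hBf : (let evs := E.getD f []
                let j := pvLastLe evs (pre.length : Int)
                if 0 ≤ j then d.insert f (PySem.List.pyGetD evs j (0, none)).2 else d)
        = (if (pvFillN f (pre ++ [r])).isSome then d.insert f (pvFillN f (pre ++ [r])) else d) := by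
      simp only [hEf']
      exact pv_bstep_char f pre rest r d
    have hlv1f : (if pvHasValue (pvGetF r f) then lv.insert f (pvGetF r f) else lv).getD f none
        = pvFillN f (pre ++ [r]) := by
      have hsnoc : pvFillN f (pre ++ [r])
          = if pvHasValue (pvGetF r f) then pvGetF r f else pvFillN f pre := by
        rw [pvFillN, List.foldl_append]; rfl
      by_cases hv : pvHasValue (pvGetF r f) = true
      · simp [hv, hsnoc, PySem.Dict.getD_insert_self]
      · simp only [hv, Bool.false_eq_true, if_false, hsnoc]
        exact hinv f List.mem_cons_self (by simpa using hv)
    have hlv1ne : ∀ g, g ≠ f →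
        (if pvHasValue (pvGetF r f) then lv.insert f (pvGetF r f) else lv).getD g none
          = lv.getD g none := by
      intro g hg
      by_cases hv : pvHasValue (pvGetF r f) = true
      · simp [hv, PySem.Dict.getD_insert_of_ne _ _ _ hg]
      · simp [hv]
    have hinv' : ∀ g ∈ fs', pvHasValue (pvGetF r g) = false →
        (if pvHasValue (pvGetF r f) then lv.insert f (pvGetF r f) else lv).getD g none
          = pvFillN g pre := by
      intro g hg hvg
      by_cases hgf : g = f
      · subst hgf
        rw [hlv1f]
        rw [pvFillN, List.foldl_append]
        simp [pvFillN, List.foldl, hvg]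
      · rw [hlv1ne g hgf]
        exact hinv g (List.mem_cons_of_mem _ hg) hvg
    have hE' : ∀ g ∈ fs', E.getD g [] = pvEv g 0 dd := fun g hg => hE g (List.mem_cons_of_mem _ hg)
    obtain ⟨c1, c2⟩ := ih
      (if (pvFillN f (pre ++ [r])).isSome then d.insert f (pvFillN f (pre ++ [r])) else d)
      (if pvHasValue (pvGetF r f) then lv.insert f (pvGetF r f) else lv) hE' hinv'
    simp only [List.foldl_cons]
    rw [hstep]
    refine ⟨?_, ?_⟩
    · rw [c1]
      exact congrArg
        (fun x => List.foldl
          (fun d field =>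
            let evs := E.getD field []
            let j := pvLastLe evs (pre.length : Int)
            if 0 ≤ j then d.insert field (PySem.List.pyGetD evs j (0, none)).2 else d) x fs')
        hBf.symm
    · intro g
      rw [c2 g]
      by_cases hg' : g ∈ fs'
      · simp [hg']
      · by_cases hgf : g = f
        · subst hgf
          simp [hg', hlv1f, List.mem_cons]
        · simp [hg', hgf, List.mem_cons, hlv1ne g hgf]

-- the events dict holds pvEv for every requested field
theorem pv_events_lookup (dd : List (List (String × Option String))) :
    ∀ (fs : List String) (d : PySem.Dict String (List (Int × Option String))) (g : String),
    (fs.foldl (fun d field => d.insert field (pvEventsCalc dd field)) d).getD g []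
      = if g ∈ fs then pvEv g 0 dd else d.getD g [] := by
  intro fs
  induction fs with
  | nil => intro d g; simp
  | cons f fs' ih =>
    intro d g
    rw [List.foldl_cons, ih]
    by_cases hg : g ∈ fs'
    · simp [hg, List.mem_cons]
    · by_cases hgf : g = f
      · subst hgf
        rw [if_neg hg, if_pos List.mem_cons_self, PySem.Dict.getD_insert_self]
        rw [pvEventsCalc, pv_eventsCalc_eq g dd 0 []]
        simp
      · simp only [hg, if_false, List.mem_cons, hgf, false_or]
        rw [PySem.Dict.getD_insert_of_ne _ _ _ hgf]

-- the outer row loop, with pre the rows already processed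
theorem pv_outer (dd : List (List (String × Option String))) (field_names : List String)
    (E : PySem.Dict String (List (Int × Option String)))
    (hE : ∀ g ∈ field_names, E.getD g [] = pvEv g 0 dd) :
    ∀ (rest pre : List (List (String × Option String)))
      (acc : List (List (String × Option String))) (lv : PySem.Dict String (Option String)),
    dd = pre ++ rest →
    (∀ g ∈ field_names, lv.getD g none = pvFillN g pre) →
    (rest.foldl
      (fun (st : List (List (String × Option String)) × PySem.Dict String (Option String)) item =>
        let inner := field_names.foldl (pvStepF (PySem.Dict.mk item)) (PySem.Dict.mk item, st.2)
        (st.1 ++ [inner.1.items], inner.2))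
      (acc, lv)).1
    = (PySem.List.enumerate rest (pre.length : Int)).foldl
        (fun res p =>
          let new_item := field_names.foldl
            (fun d field =>
              let evs := E.getD field []
              let j := pvLastLe evs p.1
              if 0 ≤ j then d.insert field (PySem.List.pyGetD evs j (0, none)).2 else d)
            (PySem.Dict.mk p.2)
          res ++ [new_item.items]) acc := by
  intro rest
  induction rest with
  | nil => intro pre acc lv _ _; simp [PySem.List.enumerate_nil]
  | cons r rest' ih =>
    intro pre acc lv hdd hinv
    obtain ⟨c1, c2⟩ := pv_inner pre rest' r dd hdd E field_names (PySem.Dict.mk r) lv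
      (fun g hg => hE g hg)
      (fun g hg hv => hinv g hg)
    rw [PySem.List.enumerate_cons, List.foldl_cons, List.foldl_cons]
    have hstart : (pre.length : Int) + 1 = ((pre ++ [r]).length : Int) := by
      simp
    rw [hstart]
    have hdd' : dd = (pre ++ [r]) ++ rest' := by simpa using hdd
    have hinv' : ∀ g ∈ field_names,
        (field_names.foldl (pvStepF (PySem.Dict.mk r)) (PySem.Dict.mk r, lv)).2.getD g none
          = pvFillN g (pre ++ [r]) := by
      intro g hg
      rw [c2 g, if_pos hg]
    have := ih (pre ++ [r])
      (acc ++ [(field_names.foldl (pvStepF (PySem.Dict.mk r)) (PySem.Dict.mk r, lv)).1.items])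
      (field_names.foldl (pvStepF (PySem.Dict.mk r)) (PySem.Dict.mk r, lv)).2 hdd' hinv'
    rw [this, c1]

theorem pv_init_none : ∀ (fns : List String) (d : PySem.Dict String (Option String)),
    (∀ h, d.getD h none = none) →
    ∀ h, (fns.foldl (fun d f => d.insert f (none : Option String)) d).getD h none = none := by
  intro fns
  induction fns with
  | nil => intro d hd; exact hd
  | cons f fs ih =>
    intro d hd h
    rw [List.foldl_cons]
    refine ih (d.insert f none) (fun h' => ?_) h
    rw [PySem.Dict.getD_insert]
    split <;> [rfl; exact hd h']

-- ===== VERDICT (by name: the statement is the Claim_ definition above) =====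
theorem apply_ffill_py_spec : Claim_equal_apply_ffill_py := by
  intro data_items field_names _
  unfold Spec_apply_ffill_py apply_ffill_py apply_ffill_py_alt
  by_cases he : data_items.isEmpty
  · simp [he]
  · simp only [he, Bool.false_eq_true, if_false]
    exact pv_outer data_items field_names _
      (fun g hg => pv_events_lookup data_items field_names PySem.Dict.empty g ▸ by
        simp [hg])
      data_items [] [] _
      rfl
      (fun g hg => by
        rw [pv_init_none field_names PySem.Dict.empty (fun h => by simp [PySem.Dict.getD_empty]) g]
        rfl)
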